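-- pv_equiv track=rewrite | github.com/sonushahuji4/Data-Structure-and-Algorithm | dp/04_Frog Jump with k distances(DP-4).py | frogJumpKSteps
-- ===== SOURCE A (Python) =====
-- def frogJumpKSteps(n, height, k):
--     # Initialize dp array where dp[i] will store the minimum energy to reach stair i
--     dp = [-1] * n
--
--     # Base case: If the frog is at the first stair, no energy is needed
--     dp[0] = 0
--
--     # Recursive function to calculate the minimum energy required to reach stair i
--     def minEnergy(i):
--         # If the value has already been computed, return it
--         if dp[i] != -1: return dp[i]
--
--         # Initialize the minimum energy required to a large value
--         minEnergyRequired = float('inf')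
--
--         # Try all possible jumps from stair i-1, i-2, ..., i-k
--         for j in range(1, k + 1):
--             if i - j >= 0:  # Make sure we are within bounds
--                 jumpEnergy = minEnergy(i - j) + abs(height[i] - height[i - j])
--                 minEnergyRequired = min(minEnergyRequired, jumpEnergy)
--
--         # Store the computed value in dp array and return it
--         dp[i] = minEnergyRequired
--         return dp[i]
--
--     # Start the recursion from the last stair
--     return minEnergy(n - 1)
-- ===== SOURCE B (Python) =====
-- def frogJumpKSteps(n, height, k):
--     # Bottom-up tabulation: dp[i] = min energy to reach stair i; the inner
--     # scan over previous stairs is capped at min(i, k).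
--     dp = [0]
--     for i in range(1, n):
--         dp.append(min(dp[i - j] + abs(height[i] - height[i - j])
--                       for j in range(1, min(i, k) + 1)))
--     return dp[n - 1]
-- ===== Notes on version B (the rewrite author's own statement) =====
-- stated objective: faster
-- what changed: top-down memoized recursion with a -1 sentinel cache is replaced by a bottom-up tabulation built left-to-right whose inner scan is capped at min(i,k), removing all recursion and cache checks
-- outside the precondition, e.g. on frogJumpKSteps(2, [1, 5], 0): A returns inf, B raises ValueError
import Mathlib
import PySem

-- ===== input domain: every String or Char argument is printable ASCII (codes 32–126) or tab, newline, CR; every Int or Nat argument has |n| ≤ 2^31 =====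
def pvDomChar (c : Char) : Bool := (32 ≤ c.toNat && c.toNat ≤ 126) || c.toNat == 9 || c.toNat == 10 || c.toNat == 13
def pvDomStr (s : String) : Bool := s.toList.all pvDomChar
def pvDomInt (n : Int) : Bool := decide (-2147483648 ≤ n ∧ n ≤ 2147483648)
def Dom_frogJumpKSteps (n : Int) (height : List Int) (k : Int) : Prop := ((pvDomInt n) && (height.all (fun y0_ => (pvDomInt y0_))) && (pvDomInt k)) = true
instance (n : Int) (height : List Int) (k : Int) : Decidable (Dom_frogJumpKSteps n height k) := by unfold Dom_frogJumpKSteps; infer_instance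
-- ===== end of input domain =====

-- B replaces A's top-down memoized recursion (sentinel cache, mutable dp) by a bottom-up
-- tabulation whose inner scan is capped at min(i,k); objective: faster (no recursion, no cache).

-- ===== PORT A =====
-- Python's `min(acc, x)` where `acc` may still be `float('inf')` (modelled as `none`).
def pvOptMin (a : Option Int) (b : Int) : Int :=
  match a with
  | none => b
  | some x => min x b

mutual
/-- `minEnergy(i)` of A: sentinel-cache check, then the j-loop, then store.
    `dp[i]` is read as `dp.getD i (-1)` (always in range under `Pre_`); when the
    j-loop found no candidate Python would store `float('inf')` — unreachable
    under `Pre_`, modelled by the `.getD (-1)` placeholder. -/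
def frogGoA (height : List Int) (k : Int) (i : Nat) (dp : List Int) : Int × List Int :=
  if dp.getD i (-1) ≠ -1 then (dp.getD i (-1), dp)
  else
    let r := frogLoopA height k i 1 none dp
    let v := r.1.getD (-1)
    (v, r.2.set i v)
termination_by ((i : Nat), (k + 1).toNat + 1)
decreasing_by exact Prod.Lex.right _ (by omega)

/-- the loop `for j in range(1, k+1)` of `minEnergy`; `1 ≤ j` is an invariant of the
    loop counter, recorded in the guard only for termination. -/
def frogLoopA (height : List Int) (k : Int) (i : Nat) (j : Int) (acc : Option Int) (dp : List Int) :
    Option Int × List Int :=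
  if h : 1 ≤ j ∧ j ≤ k then
    if hb : 0 ≤ (i : Int) - j then
      let r := frogGoA height k (i - j.toNat) dp
      let jump := r.1 + |height.getD i 0 - height.getD (i - j.toNat) 0|
      frogLoopA height k i (j + 1) (some (pvOptMin acc jump)) r.2
    else frogLoopA height k i (j + 1) acc dp
  else (acc, dp)
termination_by ((i : Nat), (k + 1 - j).toNat)
decreasing_by
· exact Prod.Lex.left _ _ (by omega)
· exact Prod.Lex.right _ (by omega)
· exact Prod.Lex.right _ (by omega)
end

def frogJumpKSteps (n : Int) (height : List Int) (k : Int) : Int :=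
  (frogGoA height k (n - 1).toNat ((List.replicate n.toNat (-1 : Int)).set 0 0)).1

-- ===== PORT B =====
/-- one iteration of B's `for i in range(1, n)` loop: append the windowed minimum. -/
def frogRowB (height : List Int) (k : Int) (dp : List Int) (i : Int) : List Int :=
  dp ++ [(PySem.List.min?
      ((PySem.List.pyRange 1 (min i k + 1) 1).map (fun j =>
        dp.getD (i - j).toNat 0 + |height.getD i.toNat 0 - height.getD (i - j).toNat 0|))
      (fun x => x)).getD 0]

def frogJumpKSteps_alt (n : Int) (height : List Int) (k : Int) : Int :=
  (PySem.List.pyGet? ((PySem.List.pyRange 1 n 1).foldl (frogRowB height k) [0]) (n - 1)).getD 0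

-- ===== PRECONDITION & SPEC =====
-- Pre_ excludes the inputs where A raises (n < 1, or n ≥ 2 with n > len(height):
-- IndexError) and the inputs where A returns float('inf'), not an int (n ≥ 2 with k < 1).
def Pre_frogJumpKSteps (n : Int) (height : List Int) (k : Int) : Prop :=
  1 ≤ n ∧ (n = 1 ∨ (n ≤ height.length ∧ 1 ≤ k))
instance (n : Int) (height : List Int) (k : Int) : Decidable (Pre_frogJumpKSteps n height k) := by
  unfold Pre_frogJumpKSteps; infer_instance

def pvWitness_frogJumpKSteps : Int × List Int × Int := (4, (10 : Int) :: 30 :: 40 :: 20 :: [], 2)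

def Spec_frogJumpKSteps (n : Int) (height : List Int) (k : Int) (out : Int) : Prop := out = frogJumpKSteps_alt n height k
instance (n : Int) (height : List Int) (k : Int) (out : Int) : Decidable (Spec_frogJumpKSteps n height k out) := by unfold Spec_frogJumpKSteps; infer_instance

-- ===== CLAIM (what is proved, stated in full; the proofs are below) =====
def Claim_equal_frogJumpKSteps : Prop := ∀ (n : Int) (height : List Int) (k : Int), Dom_frogJumpKSteps n height k → Pre_frogJumpKSteps n height k → Spec_frogJumpKSteps n height k (frogJumpKSteps n height k)

-- ===== LEMMAS AND PROOFS =====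

/-- the table B builds: `Etab i` is B's `dp` after the iteration `i` of its loop. -/
def Etab (height : List Int) (k : Int) : Nat → List Int
  | 0 => [0]
  | i + 1 => frogRowB height k (Etab height k i) ((i : Int) + 1)

/-- the mathematical dp value. -/
def Ev (height : List Int) (k : Int) (i : Nat) : Int := (Etab height k i).getD i 0

theorem length_Etab (height : List Int) (k : Int) (i : Nat) :
    (Etab height k i).length = i + 1 := by
  induction i with
  | zero => rfl
  | succ m ih => simp [Etab, frogRowB, ih]

theorem Etab_getD (height : List Int) (k : Int) {m i : Nat} (h : m ≤ i) :
    (Etab height k i).getD m 0 = Ev height k m := by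
  induction i with
  | zero => interval_cases m; rfl
  | succ p ih =>
    rcases Nat.lt_or_ge m (p + 1) with hm | hm
    · rw [← ih (by omega)]
      show (frogRowB height k (Etab height k p) _).getD m 0 = _
      unfold frogRowB
      rw [List.getD_eq_getElem?_getD, List.getD_eq_getElem?_getD,
        List.getElem?_append_left (by rw [length_Etab]; omega)]
      rfl
    · have : m = p + 1 := by omega
      subst this; rfl

theorem foldB_eq_Etab (height : List Int) (k : Int) (N : Nat) :
    (PySem.List.pyRange 1 ((N : Int) + 1) 1).foldl (frogRowB height k) [0] = Etab height k N := by
  induction N with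
  | zero => simp [PySem.List.pyRange_one_eq_nil, Etab]
  | succ m ih =>
    have : ((m : Int) + 1 + 1) = ((m : Int) + 1) + 1 := by ring
    rw [show (((m + 1 : Nat) : Int) + 1) = ((m : Int) + 1) + 1 by push_cast; ring,
      PySem.List.pyRange_one_succ_right (by omega), List.foldl_append, ih]
    simp [Etab]

theorem alt_eq_Ev (n : Int) (height : List Int) (k : Int) (hn : 1 ≤ n) :
    frogJumpKSteps_alt n height k = Ev height k (n - 1).toNat := by
  set N : Nat := (n - 1).toNat with hN
  have hn' : n = (N : Int) + 1 := by omega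
  unfold frogJumpKSteps_alt
  rw [hn', foldB_eq_Etab]
  have hlen : (Etab height k N).length = N + 1 := length_Etab height k N
  rw [show ((N : Int) + 1 - 1) = (N : Int) by ring, PySem.List.pyGet?_natCast,
    List.getElem?_eq_getElem (by omega)]
  simp [Ev, List.getD_eq_getElem?_getD, List.getElem?_eq_getElem (by omega : N < (Etab height k N).length)]

-- A's loop accumulator step; `some (pvOptMin · ·)` is exactly `min?`'s fold step on `Int`.
def ostep (a : Option Int) (c : Int) : Option Int := some (pvOptMin a c)

theorem min?_eq_foldl_ostep (L : List Int) :
    PySem.List.min? L (fun x => x) = L.foldl ostep none := by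
  unfold PySem.List.min?
  congr 1
  funext a c
  cases a with
  | none => rfl
  | some m =>
    show (if c < m then some c else some m) = some (min m c)
    rcases lt_or_ge c m with h | h
    · rw [if_pos h, min_eq_right h.le]
    · rw [if_neg (by omega), min_eq_left h]

theorem filter_pyRange_le (c : Int) : ∀ (a b : Int),
    (PySem.List.pyRange a b 1).filter (fun x => decide (x ≤ c)) =
      PySem.List.pyRange a (min b (c + 1)) 1 := by
  intro a b
  by_cases hab : b ≤ a
  · rw [PySem.List.pyRange_one_eq_nil hab, PySem.List.pyRange_one_eq_nil (by omega)]; rfl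
  · have hlt : a < b := by omega
    rw [PySem.List.pyRange_one_cons hlt]
    by_cases hc : a ≤ c
    · rw [List.filter_cons_of_pos (by simpa using hc), filter_pyRange_le c (a + 1) b]
      conv_rhs => rw [PySem.List.pyRange_one_cons (by omega : a < min b (c + 1))]
    · rw [List.filter_cons_of_neg (by simpa using hc), filter_pyRange_le c (a + 1) b,
        PySem.List.pyRange_one_eq_nil (by omega), PySem.List.pyRange_one_eq_nil (by omega)]
termination_by a b => (b - a).toNat
decreasing_by all_goals omega

/-- the candidate list of the recurrence at stair `i ≥ 1`, written with `Ev`. -/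
def cands (height : List Int) (k : Int) (i : Nat) : List Int :=
  (PySem.List.pyRange 1 (min (i : Int) k + 1) 1).map (fun j =>
    Ev height k ((i : Int) - j).toNat + |height.getD i 0 - height.getD ((i : Int) - j).toNat 0|)

theorem Ev_succ (height : List Int) (k : Int) (m : Nat) :
    Ev height k (m + 1) = (PySem.List.min? (cands height k (m + 1)) (fun x => x)).getD 0 := by
  have hc : ((m + 1 : Nat) : Int) = (m : Int) + 1 := by push_cast; ring
  have hmap : ((PySem.List.pyRange 1 (min ((m : Int) + 1) k + 1) 1).map (fun j =>
        (Etab height k m).getD (((m : Int) + 1) - j).toNat 0 +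
          |height.getD ((m : Int) + 1).toNat 0 - height.getD (((m : Int) + 1) - j).toNat 0|)) =
      cands height k (m + 1) := by
    unfold cands
    rw [hc]
    apply List.map_congr_left
    intro j hj
    rw [PySem.List.mem_pyRange_one] at hj
    rw [Etab_getD height k (show (((m : Int) + 1) - j).toNat ≤ m by omega),
      show ((m : Int) + 1).toNat = m + 1 by omega]
  show (frogRowB height k (Etab height k m) ((m : Int) + 1)).getD (m + 1) 0 = _
  unfold frogRowB
  rw [List.getD_eq_getElem?_getD,
    List.getElem?_append_right (by rw [length_Etab] : (Etab height k m).length ≤ m + 1),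
    length_Etab, Nat.sub_self, hmap]
  rfl

theorem cands_ne_nil (height : List Int) (k : Int) (m : Nat) (hk : 1 ≤ k) :
    cands height k (m + 1) ≠ [] := by
  intro h
  have hl := congrArg List.length h
  simp only [cands, List.length_map, PySem.List.length_pyRange_one, List.length_nil] at hl
  push_cast at hl
  omega

/-- A's cache invariant. -/
def CacheInv (height : List Int) (k : Int) (dp : List Int) : Prop :=
  dp.getD 0 (-1) = 0 ∧ ∀ m : Nat, dp.getD m (-1) = -1 ∨ dp.getD m (-1) = Ev height k m

theorem Inv_set (height : List Int) (k : Int) (dp : List Int) (i : Nat)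
    (hInv : CacheInv height k dp) (hi : 1 ≤ i) :
    CacheInv height k (dp.set i (Ev height k i)) := by
  obtain ⟨h0, hall⟩ := hInv
  constructor
  · rw [List.getD_eq_getElem?_getD, List.getElem?_set_ne (by omega)]
    rw [List.getD_eq_getElem?_getD] at h0; exact h0
  · intro m
    rcases eq_or_ne m i with rfl | hne
    · by_cases hlen : m < dp.length
      · right
        rw [List.getD_eq_getElem?_getD, List.getElem?_set_self (by omega)]
        rfl
      · left
        rw [List.getD_eq_getElem?_getD, List.getElem?_eq_none (by simpa using hlen)]
        rfl
    · rw [List.getD_eq_getElem?_getD, List.getElem?_set_ne (by omega),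
        ← List.getD_eq_getElem?_getD]
      exact hall m

/-- the value list A's loop still has to fold in, from counter position `j`. -/
def costsFrom (height : List Int) (k : Int) (i : Nat) (j : Int) : List Int :=
  ((PySem.List.pyRange j (k + 1) 1).filter (fun j' => decide (j' ≤ (i : Int)))).map (fun j' =>
    Ev height k ((i : Int) - j').toNat + |height.getD i 0 - height.getD ((i : Int) - j').toNat 0|)

theorem loopA_spec (height : List Int) (k : Int) (i : Nat)
    (hGo : ∀ i' < i, ∀ dp, CacheInv height k dp →
      (frogGoA height k i' dp).1 = Ev height k i' ∧ CacheInv height k (frogGoA height k i' dp).2) :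
    ∀ (fuel : Nat) (j : Int) (acc : Option Int) (dp : List Int), fuel = (k + 1 - j).toNat → 1 ≤ j →
      CacheInv height k dp →
      (frogLoopA height k i j acc dp).1 = (costsFrom height k i j).foldl ostep acc ∧
        CacheInv height k (frogLoopA height k i j acc dp).2 := by
  intro fuel
  induction fuel with
  | zero =>
    intro j acc dp hf hj hInv
    have hjk : ¬ (1 ≤ j ∧ j ≤ k) := by omega
    rw [frogLoopA, dif_neg hjk]
    constructor
    · unfold costsFrom
      rw [PySem.List.pyRange_one_eq_nil (by omega)]
      rfl
    · exact hInv
  | succ f ih =>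
    intro j acc dp hf hj hInv
    have hjk : j ≤ k := by omega
    rw [frogLoopA, dif_pos ⟨hj, hjk⟩]
    have hrange : PySem.List.pyRange j (k + 1) 1 = j :: PySem.List.pyRange (j + 1) (k + 1) 1 :=
      PySem.List.pyRange_one_cons (by omega)
    by_cases hb : 0 ≤ (i : Int) - j
    · rw [dif_pos hb]
      have hji : (i : Int) - j.toNat = (i : Int) - j := by omega
      have hlt : i - j.toNat < i := by omega
      obtain ⟨hval, hInv'⟩ := hGo (i - j.toNat) hlt dp hInv
      have hrec := ih (j + 1) (some (pvOptMin acc ((frogGoA height k (i - j.toNat) dp).1 +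
        |height.getD i 0 - height.getD (i - j.toNat) 0|))) (frogGoA height k (i - j.toNat) dp).2
        (by omega) (by omega) hInv'
      refine ⟨?_, hrec.2⟩
      rw [hrec.1]
      unfold costsFrom
      rw [hrange, List.filter_cons_of_pos (by simpa using (by omega : j ≤ (i : Int)))]
      rw [List.map_cons, List.foldl_cons,
        show (((i : Nat) : Int) - j).toNat = i - j.toNat by omega, hval]
      rfl
    · rw [dif_neg hb]
      have hrec := ih (j + 1) acc dp (by omega) (by omega) hInv
      refine ⟨?_, hrec.2⟩
      rw [hrec.1]
      unfold costsFrom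
      rw [hrange, List.filter_cons_of_neg (by simpa using (by omega : ¬ j ≤ (i : Int)))]

theorem goA_spec (height : List Int) (k : Int) (hk : 1 ≤ k) :
    ∀ (i : Nat) (dp : List Int), CacheInv height k dp →
      (frogGoA height k i dp).1 = Ev height k i ∧ CacheInv height k (frogGoA height k i dp).2 := by
  intro i
  induction i using Nat.strong_induction_on with
  | _ i IH =>
    intro dp hInv
    rw [frogGoA]
    by_cases hcur : dp.getD i (-1) ≠ -1
    · rw [if_pos hcur]
      rcases hInv.2 i with h | h
      · exact absurd h hcur
      · exact ⟨h, hInv⟩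
    · rw [if_neg hcur]
      rw [not_not] at hcur
      have hi : 1 ≤ i := by
        rcases Nat.eq_zero_or_pos i with rfl | h
        · rw [hInv.1] at hcur; omega
        · exact h
      obtain ⟨m, rfl⟩ : ∃ m, i = m + 1 := ⟨i - 1, by omega⟩
      have hloop := loopA_spec height k (m + 1) (fun i' hi' dp' hInv' => IH i' hi' dp' hInv')
        (k + 1 - 1).toNat 1 none dp rfl (le_refl 1) hInv
      -- the fold of A's loop is exactly min? of the candidate list
      have hcosts : costsFrom height k (m + 1) 1 = cands height k (m + 1) := by
        unfold costsFrom cands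
        congr 1
        rw [show (fun j' => decide (j' ≤ ((m + 1 : Nat) : Int))) =
              (fun j' => decide (j' ≤ ((m : Int) + 1))) by push_cast; ring_nf,
          filter_pyRange_le ((m : Int) + 1) 1 (k + 1)]
        congr 2
        push_cast
        omega
      have hmin : (frogLoopA height k (m + 1) 1 none dp).1 =
          PySem.List.min? (cands height k (m + 1)) (fun x => x) := by
        rw [hloop.1, hcosts, min?_eq_foldl_ostep]
      obtain ⟨v, hv⟩ : ∃ v, PySem.List.min? (cands height k (m + 1)) (fun x => x) = some v := by
        rcases h : PySem.List.min? (cands height k (m + 1)) (fun x => x) with _ | v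
        · exact absurd ((PySem.List.min?_eq_none_iff _ _).1 h) (cands_ne_nil height k m hk)
        · exact ⟨v, rfl⟩
      have hEv : Ev height k (m + 1) = v := by rw [Ev_succ, hv]; rfl
      constructor
      · show (frogLoopA height k (m + 1) 1 none dp).1.getD (-1) = _
        rw [hmin, hv, hEv]; rfl
      · show CacheInv height k ((frogLoopA height k (m + 1) 1 none dp).2.set (m + 1)
          ((frogLoopA height k (m + 1) 1 none dp).1.getD (-1)))
        have : (frogLoopA height k (m + 1) 1 none dp).1.getD (-1) = Ev height k (m + 1) := by
          rw [hmin, hv, hEv]; rfl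
        rw [this]
        exact Inv_set height k _ (m + 1) hloop.2 (by omega)

theorem Inv_init (height : List Int) (k : Int) (n : Int) (hn : 1 ≤ n) :
    CacheInv height k ((List.replicate n.toNat (-1 : Int)).set 0 0) := by
  have hlen : 1 ≤ (List.replicate n.toNat (-1 : Int)).length := by
    rw [List.length_replicate]; omega
  constructor
  · rw [List.getD_eq_getElem?_getD, List.getElem?_set_self (by omega)]
    rfl
  · intro m
    rcases Nat.eq_zero_or_pos m with rfl | hm
    · right
      rw [List.getD_eq_getElem?_getD, List.getElem?_set_self (by omega)]
      rfl
    · left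
      by_cases hlt : m < n.toNat
      · rw [List.getD_eq_getElem?_getD, List.getElem?_set_ne (by omega),
          List.getElem?_eq_getElem (by rw [List.length_replicate]; omega)]
        simp
      · rw [List.getD_eq_getElem?_getD, List.getElem?_set_ne (by omega),
          List.getElem?_eq_none (by rw [List.length_replicate]; omega)]
        rfl

-- ===== VERDICT (by name: the statement is the Claim_ definition above) =====
theorem frogJumpKSteps_spec : Claim_equal_frogJumpKSteps := by
  intro n height k _ hpre
  obtain ⟨hn, hrest⟩ := hpre
  show frogJumpKSteps n height k = frogJumpKSteps_alt n height k
  by_cases hk : 1 ≤ k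
  · rw [alt_eq_Ev n height k hn]
    exact (goA_spec height k hk (n - 1).toNat _ (Inv_init height k n hn)).1
  · have hn1 : n = 1 := by
      rcases hrest with h | ⟨_, hk'⟩
      · exact h
      · omega
    subst hn1
    unfold frogJumpKSteps frogJumpKSteps_alt
    rw [frogGoA, show PySem.List.pyRange 1 1 1 = [] from PySem.List.pyRange_one_eq_nil (by omega)]
    norm_num [PySem.List.pyGet?_zero]
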